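-- pv_equiv track=rewrite | github.com/Angellsh/COP4533-Group-13 | COP4533-Final-Project/milestone3/algorithm_task6.py | algorithm6
-- ===== SOURCE A (Python) =====
-- def algorithm6(A, c):
--     # if the array is empty, or there are no stocks, or no days, return empty list []
--     if not A or len(A) == 0 or len(A[0]) == 0:
--         return []
--
--     m = len(A)
--     n = len(A[0])
--
--     #if m == 0 or n == 0:
--     #   return []
--
--     # store best profit up to the each day
--     dp = [0] * n
--     # store transactions that give best profit of day
--     transactions = [None] * n
--
--     # intialize results to store optimal transaction sequence
--     results = []
--     # initialize current day to the last day for backtracking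
--     currDay = n - 1
--
--     # go through all buy and sell day pairs
--     for j1 in range(0, n - 1):
--         for j2 in range(j1 + 1, n):
--             # iterate through each stock
--             for i in range(m):
--                 # calculate profit sell day - buy day
--                 profit = A[i][j2] - A[i][j1]
--                 if profit < 0:
--                     # skip transaction if there is no profit
--                     continue
--
--                 # check for previous day after cool-down
--                 prevDay = j1 - c -  1
--                 if prevDay >= 0:
--                     totalProfit = profit + dp[prevDay]
--                 else:
--                     totalProfit = profit
--
--                 # update best profit and store transaction
--                 if totalProfit > dp[j2]:
--                     dp[j2] = totalProfit
--                     transactions[j2] = (i, j1, j2, prevDay)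
--
--     # Check skipped days with best profits
--     for skippedDays in range(1,n):
--         if dp[skippedDays-1] > dp[skippedDays]:
--             dp[skippedDays] = dp[skippedDays-1]
--             # only get transaction if current one is none existent
--             if transactions[skippedDays] is None:
--                 transactions[skippedDays] = transactions[skippedDays-1]
--
--
--     # backtrack to get best sequence
--     while currDay >= 0:
--         if transactions[currDay] is not None:
--             i, j1, j2, prevDay = transactions[currDay]
--             # Get 1-based index for output
--             results.append((i+1, j1+ 1, j2 + 1))
--             # go to the previous transaction day
--             currDay = prevDay
--         else:
--             # go to previous day
--             currDay -= 1
--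
--     # reverse to get correct order output earliest transaction first
--     results.reverse()
--     return results
-- ===== SOURCE B (Python) =====
-- def algorithm6(A, c):
--     # B: values-only DP (no transaction/back-pointer table, no carry pass, no
--     # forward fill): dp[j] is the best chain profit with last sale exactly on
--     # day j, each entry a max() over a candidate comprehension; the sequence is
--     # reconstructed afterwards by re-deriving, at each emitted day, the earliest
--     # candidate (buy-day-major, then stock) attaining the dp value.
--     if not A or not A[0]:
--         return []
--     m, n = len(A), len(A[0])
--     dp = []
--     for j2 in range(n):
--         dp.append(max((A[i][j2] - A[i][j1]
--                        + (dp[j1 - c - 1] if j1 - c - 1 >= 0 else 0)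
--                        for j1 in range(j2) for i in range(m)
--                        if A[i][j2] - A[i][j1] >= 0), default=0))
--
--     def pick(j):
--         # earliest (buy day, stock) whose candidate value attains dp[j]
--         for j1 in range(j):
--             base = dp[j1 - c - 1] if j1 - c - 1 >= 0 else 0
--             for i in range(m):
--                 gain = A[i][j] - A[i][j1]
--                 if gain >= 0 and gain + base == dp[j]:
--                     return i, j1, j1 - c - 1
--         return None
--
--     res = []
--     d = n - 1
--     while d >= 0:
--         if dp[d] > 0:
--             i, j1, prev = pick(d)
--             res = [(i + 1, j1 + 1, d + 1)] + res
--             d = prev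
--         else:
--             d -= 1
--     return res
-- ===== Notes on version B (the rewrite author's own statement) =====
-- stated objective: alternative
-- what changed: B stores no back-pointer/transaction table at all: it computes a values-only dp list (each entry one max() over a candidate comprehension), drops A's carry pass and forward fill entirely, and reconstructs the transaction sequence afterwards by re-deriving, at each emitted day, the earliest candidate attaining the dp value, prepending results instead of append-and-reverse.
-- outside the precondition, e.g. on algorithm6([[-2, -2]], -2): A returns [], B raises IndexError; on algorithm6([[2, 1]], -2): A returns [], B returns []
import Mathlib
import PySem

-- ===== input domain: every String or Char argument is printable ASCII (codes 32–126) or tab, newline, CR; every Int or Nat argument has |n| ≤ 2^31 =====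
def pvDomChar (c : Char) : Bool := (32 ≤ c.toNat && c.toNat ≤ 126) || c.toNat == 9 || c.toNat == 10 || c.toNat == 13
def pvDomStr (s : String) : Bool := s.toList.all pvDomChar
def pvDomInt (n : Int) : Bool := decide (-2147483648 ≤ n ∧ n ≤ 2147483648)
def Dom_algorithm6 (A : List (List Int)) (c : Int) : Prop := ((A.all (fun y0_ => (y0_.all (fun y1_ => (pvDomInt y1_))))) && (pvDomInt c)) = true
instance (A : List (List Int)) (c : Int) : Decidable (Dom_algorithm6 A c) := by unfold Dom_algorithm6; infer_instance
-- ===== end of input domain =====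

-- B keeps no transaction/back-pointer table at all: a values-only dp list (one max() per
-- day), no carry pass and no forward fill; the sequence is reconstructed afterwards by
-- re-deriving each emitted day's earliest best candidate (objective: alternative).

-- ===== PORT A =====
-- A[i][j] for 0 ≤ i,j in range (Pre_ keeps Python's indexing in range, so the default is never the result)
def pvGet2 (A : List (List Int)) (i j : Nat) : Int := (A.getD i []).getD j 0

-- body of A's innermost `for i in range(m)` loop (state = the dp and transactions arrays)
def pvStepA (A : List (List Int)) (c : Int) (j1 j2 : Nat)
    (st : List Int × List (Option (Int × Int × Int × Int))) (i : Nat) :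
    List Int × List (Option (Int × Int × Int × Int)) :=
  let profit := pvGet2 A i j2 - pvGet2 A i j1
  if profit < 0 then st
  else
    let prevDay : Int := (j1 : Int) - c - 1
    let total := if 0 ≤ prevDay then profit + st.1.getD prevDay.toNat 0 else profit
    if st.1.getD j2 0 < total then
      (st.1.set j2 total, st.2.set j2 (some ((i : Int), (j1 : Int), (j2 : Int), prevDay)))
    else st

-- A's triple loop `for j1 in range(0, n-1): for j2 in range(j1+1, n): for i in range(m)`
def pvLoopA (A : List (List Int)) (c : Int) (m n : Nat)
    (st0 : List Int × List (Option (Int × Int × Int × Int))) :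
    List Int × List (Option (Int × Int × Int × Int)) :=
  (List.range (n - 1)).foldl (fun st j1 =>
    (List.range' (j1 + 1) (n - 1 - j1)).foldl (fun st j2 =>
      (List.range m).foldl (pvStepA A c j1 j2) st) st) st0

-- body of A's `for skippedDays in range(1, n)` carry pass
def pvCarryA (st : List Int × List (Option (Int × Int × Int × Int))) (k : Nat) :
    List Int × List (Option (Int × Int × Int × Int)) :=
  if st.1.getD (k - 1) 0 > st.1.getD k 0 then
    (st.1.set k (st.1.getD (k - 1) 0),
     if st.2.getD k none = none then st.2.set k (st.2.getD (k - 1) none) else st.2)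
  else st

-- A's `while currDay >= 0` backtrack; fuel = n+1 is a totality guard only (under Pre_,
-- currDay strictly decreases, so n+1 iterations always reach currDay < 0)
def pvBackA (tr : List (Option (Int × Int × Int × Int))) :
    Nat → Int → List (Int × Int × Int) → List (Int × Int × Int)
  | 0, _, res => res
  | fuel + 1, d, res =>
    if d < 0 then res
    else
      match tr.getD d.toNat none with
      | some (i, j1, j2, prev) => pvBackA tr fuel prev (res ++ [(i + 1, j1 + 1, j2 + 1)])
      | none => pvBackA tr fuel (d - 1) res

def algorithm6 (A : List (List Int)) (c : Int) : List (Int × Int × Int) :=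
  if A = [] ∨ A.length = 0 ∨ (A.headD []).length = 0 then []
  else
    let m := A.length
    let n := (A.headD []).length
    let st1 := pvLoopA A c m n (List.replicate n 0, List.replicate n none)
    let st2 := (List.range' 1 (n - 1)).foldl pvCarryA st1
    (pvBackA st2.2 (n + 1) ((n : Int) - 1) []).reverse

-- ===== PORT B =====
-- `dp[j1-c-1] if j1-c-1 >= 0 else 0`
def pvBaseB (c : Int) (dp : List Int) (j1 : Nat) : Int :=
  if 0 ≤ (j1 : Int) - c - 1 then dp.getD ((j1 : Int) - c - 1).toNat 0 else 0

-- B's candidate comprehension for day j2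
def pvCands (A : List (List Int)) (c : Int) (m : Nat) (dp : List Int) (j2 : Nat) : List Int :=
  (List.range j2).flatMap (fun j1 =>
    (List.range m).filterMap (fun i =>
      if 0 ≤ pvGet2 A i j2 - pvGet2 A i j1 then
        some (pvGet2 A i j2 - pvGet2 A i j1 + pvBaseB c dp j1)
      else none))

-- B's dp loop: `dp.append(max(cands, default=0))`
def pvDpB (A : List (List Int)) (c : Int) (m n : Nat) : List Int :=
  (List.range n).foldl (fun dp j2 =>
    dp ++ [match PySem.List.max? (pvCands A c m dp j2) (fun v => v) with
           | none => 0
           | some v => v]) []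

-- iteration order of pick's nested `for j1 … for i …` loops
def pvPairs (j2 m : Nat) : List (Nat × Nat) :=
  (List.range j2).flatMap (fun j1 => (List.range m).map (fun i => (j1, i)))

-- B's `pick(j)`: earliest candidate attaining dp[j] (early-return nested loops)
def pvPickB (A : List (List Int)) (c : Int) (m : Nat) (dp : List Int) (j : Nat) :
    Option (Int × Int × Int) :=
  (pvPairs j m).findSome? (fun p =>
    if 0 ≤ pvGet2 A p.2 j - pvGet2 A p.2 p.1 ∧
       pvGet2 A p.2 j - pvGet2 A p.2 p.1 + pvBaseB c dp p.1 = dp.getD j 0 then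
      some ((p.2 : Int), (p.1 : Int), (p.1 : Int) - c - 1)
    else none)

-- B's `while d >= 0` reconstruction loop (prepending); fuel = n+1 is a totality guard
-- only (under Pre_, d strictly decreases each iteration)
def pvWalkB (A : List (List Int)) (c : Int) (m : Nat) (dp : List Int) :
    Nat → Int → List (Int × Int × Int) → List (Int × Int × Int)
  | 0, _, res => res
  | fuel + 1, d, res =>
    if d < 0 then res
    else if 0 < dp.getD d.toNat 0 then
      match pvPickB A c m dp d.toNat with
      | some (i, j1, prev) => pvWalkB A c m dp fuel prev ((i + 1, j1 + 1, d + 1) :: res)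
      | none => res
    else pvWalkB A c m dp fuel (d - 1) res

def algorithm6_alt (A : List (List Int)) (c : Int) : List (Int × Int × Int) :=
  if A = [] ∨ A.headD [] = [] then []
  else
    let n := (A.headD []).length
    let dp := pvDpB A c A.length n
    pvWalkB A c A.length dp (n + 1) ((n : Int) - 1) []

-- ===== PRECONDITION & SPEC =====
-- When there are at least 2 days, Pre_ excludes (a) cooldowns c ≤ -2, on which A indexes
-- dp past the end (IndexError) or its backtracking revisits a day forever (divergence) or,
-- when it does return, the value comes from reading dp entries that are not yet computed —
-- an artefact of A's loop order (B raises IndexError there); and (b) ragged matrices whose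
-- first row is longer than a later row, on which A raises IndexError reading past a short row.
def Pre_algorithm6 (A : List (List Int)) (c : Int) : Prop :=
  (A.headD []).length ≤ 1 ∨ (-1 ≤ c ∧ ∀ row ∈ A, (A.headD []).length ≤ row.length)
instance (A : List (List Int)) (c : Int) : Decidable (Pre_algorithm6 A c) := by
  unfold Pre_algorithm6; infer_instance

def pvWitness_algorithm6 : List (List Int) × Int := ([[1, 5], [3, 2]], 0)

def Spec_algorithm6 (A : List (List Int)) (c : Int) (out : List (Int × Int × Int)) : Prop := out = algorithm6_alt A c
instance (A : List (List Int)) (c : Int) (out : List (Int × Int × Int)) : Decidable (Spec_algorithm6 A c out) := by unfold Spec_algorithm6; infer_instance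

-- ===== CLAIM (what is proved, stated in full; the proofs are below) =====
def Claim_equal_algorithm6 : Prop := ∀ (A : List (List Int)) (c : Int), Dom_algorithm6 A c → Pre_algorithm6 A c → Spec_algorithm6 A c (algorithm6 A c)

-- ===== LEMMAS AND PROOFS =====

-- getD facts about set / append used throughout
theorem pv_getD_set_ne (xs : List Int) (i j : Nat) (v d : Int) (hne : j ≠ i) :
    (xs.set i v).getD j d = xs.getD j d := by
  simp [List.getD, List.getElem?_set]
  rw [if_neg (by omega)]

theorem pv_getD_set_eq (xs : List Int) (i : Nat) (v d : Int) (h : i < xs.length) :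
    (xs.set i v).getD i d = v := by
  simp [List.getD, h]

theorem pv_getD_set_ne' {α : Type} (xs : List (Option α)) (i j : Nat) (v d : Option α) (hne : j ≠ i) :
    (xs.set i v).getD j d = xs.getD j d := by
  simp [List.getD, List.getElem?_set]
  rw [if_neg (by omega)]

theorem pv_getD_set_eq' {α : Type} (xs : List (Option α)) (i : Nat) (v d : Option α) (h : i < xs.length) :
    (xs.set i v).getD i d = v := by
  simp [List.getD, h]

theorem pv_getD_append_lt {α : Type} (xs ys : List α) (k : Nat) (d : α) (h : k < xs.length) :
    (xs ++ ys).getD k d = xs.getD k d := by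
  simp [List.getD, List.getElem?_append_left h]

theorem pv_getD_append_self {α : Type} (xs : List α) (y : α) (d : α) (L : Nat)
    (h : xs.length = L) : (xs ++ [y]).getD L d = y := by
  subst h; simp [List.getD]

-- ----- proof-layer intermediate DP (cell folds over (best, arg) pairs) -----

-- one candidate step on the running (best, arg) pair
def pvStepC (A : List (List Int)) (c : Int) (base : Int) (j1 j2 : Nat)
    (ba : Int × Option (Int × Int × Int × Int)) (i : Nat) :
    Int × Option (Int × Int × Int × Int) :=
  let gain := pvGet2 A i j2 - pvGet2 A i j1
  if 0 ≤ gain ∧ ba.1 < gain + base then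
    (gain + base, some ((i : Int), (j1 : Int), (j2 : Int), (j1 : Int) - c - 1))
  else ba

-- per-day argmax over `j1 < j2`, `i < m`
def pvCellC (A : List (List Int)) (c : Int) (m : Nat) (dp : List Int) (j2 : Nat) :
    Int × Option (Int × Int × Int × Int) :=
  (List.range j2).foldl (fun ba j1 =>
    (List.range m).foldl (pvStepC A c (pvBaseB c dp j1) j1 j2) ba) (0, none)

-- main growth of dp and tr, day by day
def pvStC (A : List (List Int)) (c : Int) (m : Nat) (J : Nat) :
    List Int × List (Option (Int × Int × Int × Int)) :=
  (List.range J).foldl (fun st j2 =>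
    let ba := pvCellC A c m st.1 j2
    (st.1 ++ [ba.1], st.2 ++ [ba.2])) ([], [])

theorem pvStC_succ (A : List (List Int)) (c : Int) (m J : Nat) :
    pvStC A c m (J + 1) =
      ((pvStC A c m J).1 ++ [(pvCellC A c m (pvStC A c m J).1 J).1],
       (pvStC A c m J).2 ++ [(pvCellC A c m (pvStC A c m J).1 J).2]) := by
  simp [pvStC, List.range_succ]

theorem pvStC_len (A : List (List Int)) (c : Int) (m J : Nat) :
    (pvStC A c m J).1.length = J ∧ (pvStC A c m J).2.length = J := by
  induction J with
  | zero => simp [pvStC]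
  | succ J ih => simp [pvStC_succ, ih.1, ih.2]

theorem pvStC_getD_stable (A : List (List Int)) (c : Int) (m : Nat) {J J' k : Nat}
    (hJ : J ≤ J') (hk : k < J) :
    (pvStC A c m J').1.getD k 0 = (pvStC A c m J).1.getD k 0 ∧
    (pvStC A c m J').2.getD k none = (pvStC A c m J).2.getD k none := by
  induction J', hJ using Nat.le_induction with
  | base => exact ⟨rfl, rfl⟩
  | succ J' hJ ih =>
    rw [pvStC_succ]
    constructor
    · rw [pv_getD_append_lt _ _ _ _ (by rw [(pvStC_len A c m J').1]; omega), ih.1]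
    · rw [pv_getD_append_lt _ _ _ _ (by rw [(pvStC_len A c m J').2]; omega), ih.2]

theorem pvStC_getD (A : List (List Int)) (c : Int) (m : Nat) {J k : Nat} (hk : k < J) :
    (pvStC A c m J).1.getD k 0 = (pvCellC A c m (pvStC A c m k).1 k).1 ∧
    (pvStC A c m J).2.getD k none = (pvCellC A c m (pvStC A c m k).1 k).2 := by
  have h1 := pvStC_getD_stable A c m (J := k + 1) (J' := J) hk (Nat.lt_succ_self k)
  rw [h1.1, h1.2, pvStC_succ]
  constructor
  · rw [pv_getD_append_self _ _ _ _ (pvStC_len A c m k).1]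
  · rw [pv_getD_append_self _ _ _ _ (pvStC_len A c m k).2]

-- the cell computation only reads dp below j2 (needs c ≥ -1)
theorem pvCellC_congr (A : List (List Int)) (c : Int) (m : Nat) (dp dp' : List Int) (j2 : Nat)
    (hc : -1 ≤ c) (h : ∀ k, k < j2 → dp.getD k 0 = dp'.getD k 0) :
    pvCellC A c m dp j2 = pvCellC A c m dp' j2 := by
  unfold pvCellC
  apply List.foldl_ext
  intro ba j1 hj1
  have hj1' : j1 < j2 := List.mem_range.mp hj1
  have hbase : pvBaseB c dp j1 = pvBaseB c dp' j1 := by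
    unfold pvBaseB
    split_ifs with hge
    · exact h _ (by omega)
    · rfl
  rw [hbase]

theorem pvCellC_final (A : List (List Int)) (c : Int) (m : Nat) {n k : Nat}
    (hc : -1 ≤ c) (hk : k < n) :
    pvCellC A c m (pvStC A c m n).1 k = pvCellC A c m (pvStC A c m k).1 k := by
  apply pvCellC_congr A c m _ _ _ hc
  intro k' hk'
  exact (pvStC_getD_stable A c m (Nat.le_of_lt hk) (by omega)).1

-- ----- A-side: partial cells and the loop invariant -----

def pvPC (A : List (List Int)) (c : Int) (m : Nat) (dp : List Int) (J k : Nat) :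
    Int × Option (Int × Int × Int × Int) :=
  (List.range (min J k)).foldl (fun ba j1 =>
    (List.range m).foldl (pvStepC A c (pvBaseB c dp j1) j1 k) ba) (0, none)

theorem pvPC_eq_cell (A : List (List Int)) (c : Int) (m : Nat) (dp : List Int) {J k : Nat}
    (h : k ≤ J) : pvPC A c m dp J k = pvCellC A c m dp k := by
  unfold pvPC pvCellC
  rw [Nat.min_eq_right h]

theorem pv_step1 (A : List (List Int)) (c : Int) (j1 j2 i : Nat)
    (st : List Int × List (Option (Int × Int × Int × Int)))
    (h1 : j2 < st.1.length) (h2 : j2 < st.2.length) :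
    (pvStepA A c j1 j2 st i).1.length = st.1.length ∧
    (pvStepA A c j1 j2 st i).2.length = st.2.length ∧
    (∀ k, k ≠ j2 →
      (pvStepA A c j1 j2 st i).1.getD k 0 = st.1.getD k 0 ∧
      (pvStepA A c j1 j2 st i).2.getD k none = st.2.getD k none) ∧
    ((pvStepA A c j1 j2 st i).1.getD j2 0, (pvStepA A c j1 j2 st i).2.getD j2 none) =
      pvStepC A c (pvBaseB c st.1 j1) j1 j2 (st.1.getD j2 0, st.2.getD j2 none) i := by
  unfold pvStepA pvStepC pvBaseB
  dsimp only
  have htot : (if 0 ≤ (j1 : Int) - c - 1 then (pvGet2 A i j2 - pvGet2 A i j1) + st.1.getD ((j1 : Int) - c - 1).toNat 0 else (pvGet2 A i j2 - pvGet2 A i j1))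
      = (pvGet2 A i j2 - pvGet2 A i j1) + (if 0 ≤ (j1 : Int) - c - 1 then st.1.getD ((j1 : Int) - c - 1).toNat 0 else 0) := by
    split_ifs <;> omega
  rw [htot]
  set g := pvGet2 A i j2 - pvGet2 A i j1 with hgdef
  set b := (if 0 ≤ (j1 : Int) - c - 1 then st.1.getD ((j1 : Int) - c - 1).toNat 0 else 0) with hbdef
  by_cases hg : g < 0
  · rw [if_pos hg, if_neg (fun hh => absurd hh.1 (by omega))]
    exact ⟨rfl, rfl, fun k hk => ⟨rfl, rfl⟩, rfl⟩
  · rw [if_neg hg]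
    by_cases hl : st.1.getD j2 0 < g + b
    · rw [if_pos hl, if_pos ⟨by omega, hl⟩]
      refine ⟨by simp, by simp, fun k hk => ⟨pv_getD_set_ne _ _ _ _ _ hk, pv_getD_set_ne' _ _ _ _ _ hk⟩, ?_⟩
      rw [pv_getD_set_eq _ _ _ _ h1, pv_getD_set_eq' _ _ _ _ h2]
    · rw [if_neg hl, if_neg (fun hh => absurd hh.2 hl)]
      exact ⟨rfl, rfl, fun k hk => ⟨rfl, rfl⟩, rfl⟩

theorem pv_base_step (A : List (List Int)) (c : Int) (j1 j2 i : Nat) (hj : j1 < j2) (hc : -1 ≤ c)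
    (st : List Int × List (Option (Int × Int × Int × Int)))
    (h1 : j2 < st.1.length) (h2 : j2 < st.2.length) :
    pvBaseB c (pvStepA A c j1 j2 st i).1 j1 = pvBaseB c st.1 j1 := by
  unfold pvBaseB
  split_ifs with hge
  · exact ((pv_step1 A c j1 j2 i st h1 h2).2.2.1 _ (by omega)).1
  · rfl

theorem pv_ifold (A : List (List Int)) (c : Int) (j1 j2 : Nat) (hj : j1 < j2) (hc : -1 ≤ c)
    (l : List Nat) :
    ∀ (st : List Int × List (Option (Int × Int × Int × Int))),
    j2 < st.1.length → j2 < st.2.length →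
    (l.foldl (pvStepA A c j1 j2) st).1.length = st.1.length ∧
    (l.foldl (pvStepA A c j1 j2) st).2.length = st.2.length ∧
    (∀ k, k ≠ j2 →
      (l.foldl (pvStepA A c j1 j2) st).1.getD k 0 = st.1.getD k 0 ∧
      (l.foldl (pvStepA A c j1 j2) st).2.getD k none = st.2.getD k none) ∧
    ((l.foldl (pvStepA A c j1 j2) st).1.getD j2 0,
     (l.foldl (pvStepA A c j1 j2) st).2.getD j2 none) =
      l.foldl (pvStepC A c (pvBaseB c st.1 j1) j1 j2) (st.1.getD j2 0, st.2.getD j2 none) := by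
  induction l with
  | nil => exact fun st h1 h2 => ⟨rfl, rfl, fun k hk => ⟨rfl, rfl⟩, rfl⟩
  | cons i l ih =>
    intro st h1 h2
    have hs := pv_step1 A c j1 j2 i st h1 h2
    have h1' : j2 < (pvStepA A c j1 j2 st i).1.length := by rw [hs.1]; exact h1
    have h2' : j2 < (pvStepA A c j1 j2 st i).2.length := by rw [hs.2.1]; exact h2
    have hb := pv_base_step A c j1 j2 i hj hc st h1 h2
    have hi := ih (pvStepA A c j1 j2 st i) h1' h2'
    refine ⟨by rw [List.foldl_cons, hi.1, hs.1], by rw [List.foldl_cons, hi.2.1, hs.2.1], ?_, ?_⟩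
    · intro k hk
      exact ⟨by rw [List.foldl_cons, (hi.2.2.1 k hk).1, (hs.2.2.1 k hk).1],
             by rw [List.foldl_cons, (hi.2.2.1 k hk).2, (hs.2.2.1 k hk).2]⟩
    · rw [List.foldl_cons, List.foldl_cons, ← hs.2.2.2, ← hb]
      exact hi.2.2.2

theorem pv_fdp_getD (A : List (List Int)) (c : Int) (m : Nat) {n k : Nat}
    (hc : -1 ≤ c) (hk : k < n) :
    (pvStC A c m n).1.getD k 0 = (pvCellC A c m (pvStC A c m n).1 k).1 ∧
    (pvStC A c m n).2.getD k none = (pvCellC A c m (pvStC A c m n).1 k).2 := by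
  rw [pvCellC_final A c m hc hk]
  exact pvStC_getD A c m hk

def pvInv (A : List (List Int)) (c : Int) (m n J : Nat)
    (st : List Int × List (Option (Int × Int × Int × Int))) : Prop :=
  st.1.length = n ∧ st.2.length = n ∧
  ∀ k, k < n →
    st.1.getD k 0 = (pvPC A c m (pvStC A c m n).1 J k).1 ∧
    st.2.getD k none = (pvPC A c m (pvStC A c m n).1 J k).2

theorem pvPC_succ (A : List (List Int)) (c : Int) (m : Nat) (dp : List Int) {J k : Nat}
    (hj : J < k) :
    pvPC A c m dp (J + 1) k =
      (List.range m).foldl (pvStepC A c (pvBaseB c dp J) J k) (pvPC A c m dp J k) := by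
  unfold pvPC
  rw [Nat.min_eq_left (by omega), Nat.min_eq_left (by omega), List.range_succ,
    List.foldl_append, List.foldl_cons, List.foldl_nil]

theorem pv_inner_aux (A : List (List Int)) (c : Int) (m n J : Nat) (hc : -1 ≤ c)
    (st : List Int × List (Option (Int × Int × Int × Int))) (hInv : pvInv A c m n J st) :
    ∀ t, J + 1 + t ≤ n →
      ((List.range' (J + 1) t).foldl (fun st j2 =>
          (List.range m).foldl (pvStepA A c J j2) st) st).1.length = n ∧
      ((List.range' (J + 1) t).foldl (fun st j2 =>
          (List.range m).foldl (pvStepA A c J j2) st) st).2.length = n ∧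
      ∀ k, k < n →
        (((List.range' (J + 1) t).foldl (fun st j2 =>
            (List.range m).foldl (pvStepA A c J j2) st) st).1.getD k 0,
         ((List.range' (J + 1) t).foldl (fun st j2 =>
            (List.range m).foldl (pvStepA A c J j2) st) st).2.getD k none) =
          (if k < J + 1 + t then pvPC A c m (pvStC A c m n).1 (J + 1) k
           else pvPC A c m (pvStC A c m n).1 J k) := by
  intro t
  induction t with
  | zero =>
    intro ht
    refine ⟨hInv.1, hInv.2.1, fun k hk => ?_⟩
    by_cases hkJ : k < J + 1 + 0
    · rw [if_pos hkJ, pvPC_eq_cell A c m _ (show k ≤ J + 1 by omega),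
        ← pvPC_eq_cell A c m _ (show k ≤ J by omega)]
      exact Prod.ext (hInv.2.2 k hk).1 (hInv.2.2 k hk).2
    · rw [if_neg hkJ]
      exact Prod.ext (hInv.2.2 k hk).1 (hInv.2.2 k hk).2
  | succ t ih =>
    intro ht
    have hih := ih (by omega)
    rw [List.range'_1_concat, List.foldl_append, List.foldl_cons, List.foldl_nil]
    set stt := (List.range' (J + 1) t).foldl (fun st j2 =>
      (List.range m).foldl (pvStepA A c J j2) st) st with hstt
    have h1 : J + 1 + t < stt.1.length := by rw [hih.1]; omega
    have h2 : J + 1 + t < stt.2.length := by rw [hih.2.1]; omega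
    have hF := pv_ifold A c J (J + 1 + t) (by omega) hc (List.range m) stt h1 h2
    refine ⟨by rw [hF.1, hih.1], by rw [hF.2.1, hih.2.1], fun k hk => ?_⟩
    by_cases hkj : k = J + 1 + t
    · subst hkj
      rw [if_pos (by omega), hF.2.2.2]
      have hold := hih.2.2 (J + 1 + t) hk
      rw [if_neg (by omega)] at hold
      have hbase : pvBaseB c stt.1 J = pvBaseB c (pvStC A c m n).1 J := by
        unfold pvBaseB
        split_ifs with hge
        · set p := ((J : Int) - c - 1).toNat with hp
          have hpJ : p ≤ J := by omega
          have hpn : p < n := by omega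
          have hpair := hih.2.2 p hpn
          rw [if_pos (by omega), pvPC_eq_cell A c m _ (show p ≤ J + 1 by omega)] at hpair
          have := congrArg Prod.fst hpair
          dsimp at this
          rw [this]
          exact ((pv_fdp_getD A c m hc hpn).1).symm
        · rfl
      rw [hbase, pvPC_succ A c m _ (by omega), hold]
    · have hunch := hF.2.2.1 k hkj
      rw [hunch.1, hunch.2]
      have hold := hih.2.2 k hk
      by_cases hklt : k < J + 1 + t
      · rw [if_pos (by omega)]
        rw [if_pos hklt] at hold
        exact hold
      · rw [if_neg (by omega)]
        rw [if_neg hklt] at hold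
        exact hold

theorem pv_inner_fold (A : List (List Int)) (c : Int) (m n J : Nat) (hc : -1 ≤ c) (hJ : J < n)
    (st : List Int × List (Option (Int × Int × Int × Int))) (hInv : pvInv A c m n J st) :
    pvInv A c m n (J + 1)
      ((List.range' (J + 1) (n - 1 - J)).foldl (fun st j2 =>
        (List.range m).foldl (pvStepA A c J j2) st) st) := by
  have h := pv_inner_aux A c m n J hc st hInv (n - 1 - J) (by omega)
  refine ⟨h.1, h.2.1, fun k hk => ?_⟩
  have hp := h.2.2 k hk
  rw [if_pos (by omega)] at hp
  exact ⟨congrArg Prod.fst hp, congrArg Prod.snd hp⟩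

theorem pv_loopA (A : List (List Int)) (c : Int) (m n : Nat) (hc : -1 ≤ c) (hn : 0 < n) :
    pvInv A c m n (n - 1) (pvLoopA A c m n (List.replicate n 0, List.replicate n none)) := by
  unfold pvLoopA
  suffices h : ∀ J, J ≤ n - 1 → pvInv A c m n J
      ((List.range J).foldl (fun st j1 =>
        (List.range' (j1 + 1) (n - 1 - j1)).foldl (fun st j2 =>
          (List.range m).foldl (pvStepA A c j1 j2) st) st)
        (List.replicate n 0, List.replicate n none)) by
    exact h (n - 1) le_rfl
  intro J
  induction J with
  | zero =>
    intro _
    refine ⟨by simp, by simp, fun k hk => ?_⟩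
    unfold pvPC
    rw [Nat.zero_min]
    exact ⟨by simp [hk], by simp [hk]⟩
  | succ J ih =>
    intro hJ
    rw [List.range_succ, List.foldl_append, List.foldl_cons, List.foldl_nil]
    exact pv_inner_fold A c m n J hc (by omega) _ (ih (by omega))

theorem pv_loopA_eq (A : List (List Int)) (c : Int) (m n : Nat) (hc : -1 ≤ c) (hn : 0 < n) :
    pvLoopA A c m n (List.replicate n 0, List.replicate n none) = pvStC A c m n := by
  have hInv := pv_loopA A c m n hc hn
  set st := pvLoopA A c m n (List.replicate n 0, List.replicate n none) with hst
  have hlen := pvStC_len A c m n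
  have hval : ∀ k, k < n →
      st.1.getD k 0 = (pvStC A c m n).1.getD k 0 ∧
      st.2.getD k none = (pvStC A c m n).2.getD k none := by
    intro k hk
    have h1 := (hInv.2.2 k hk).1
    have h2 := (hInv.2.2 k hk).2
    rw [pvPC_eq_cell A c m _ (show k ≤ n - 1 by omega)] at h1 h2
    exact ⟨by rw [h1]; exact ((pv_fdp_getD A c m hc hk).1).symm,
           by rw [h2]; exact ((pv_fdp_getD A c m hc hk).2).symm⟩
  refine Prod.ext ?_ ?_
  · apply List.ext_getElem (by rw [hInv.1, hlen.1])
    intro i hi1 hi2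
    have hi : i < n := by rw [← hInv.1]; exact hi1
    have := (hval i hi).1
    rwa [List.getD_eq_getElem _ _ hi1, List.getD_eq_getElem _ _ hi2] at this
  · apply List.ext_getElem (by rw [hInv.2.1, hlen.2])
    intro i hi1 hi2
    have hi : i < n := by rw [← hInv.2.1]; exact hi1
    have := (hval i hi).2
    rwa [List.getD_eq_getElem _ _ hi1, List.getD_eq_getElem _ _ hi2] at this

-- ----- sign / none facts about the cells -----

theorem pv_stepC_pres (A : List (List Int)) (c : Int) (base : Int) (j1 j2 : Nat)
    (l : List Nat) :
    ∀ ba : Int × Option (Int × Int × Int × Int),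
      (0 ≤ ba.1 ∧ (ba.2 = none ↔ ba.1 = 0)) →
      (0 ≤ (l.foldl (pvStepC A c base j1 j2) ba).1 ∧
       ((l.foldl (pvStepC A c base j1 j2) ba).2 = none ↔
        (l.foldl (pvStepC A c base j1 j2) ba).1 = 0)) := by
  induction l with
  | nil => exact fun ba h => h
  | cons i l ih =>
    intro ba hba
    rw [List.foldl_cons]
    apply ih
    unfold pvStepC
    dsimp only
    split_ifs with h
    · exact ⟨by omega, by constructor <;> intro hh <;> [exact absurd hh (by simp); omega]⟩
    · exact hba

theorem pv_cell_inv (A : List (List Int)) (c : Int) (m : Nat) (dp : List Int) (j2 : Nat) :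
    0 ≤ (pvCellC A c m dp j2).1 ∧
    ((pvCellC A c m dp j2).2 = none ↔ (pvCellC A c m dp j2).1 = 0) := by
  unfold pvCellC
  suffices h : ∀ l : List Nat,
      ∀ ba : Int × Option (Int × Int × Int × Int),
      (0 ≤ ba.1 ∧ (ba.2 = none ↔ ba.1 = 0)) →
      (0 ≤ (l.foldl (fun ba j1 => (List.range m).foldl (pvStepC A c (pvBaseB c dp j1) j1 j2) ba) ba).1 ∧
       ((l.foldl (fun ba j1 => (List.range m).foldl (pvStepC A c (pvBaseB c dp j1) j1 j2) ba) ba).2 = none ↔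
        (l.foldl (fun ba j1 => (List.range m).foldl (pvStepC A c (pvBaseB c dp j1) j1 j2) ba) ba).1 = 0)) by
    exact h (List.range j2) (0, none) ⟨le_rfl, by simp⟩
  intro l
  induction l with
  | nil => exact fun ba h => h
  | cons j1 l ih =>
    intro ba hba
    rw [List.foldl_cons]
    exact ih _ (pv_stepC_pres A c (pvBaseB c dp j1) j1 j2 (List.range m) ba hba)

theorem pv_fdp_props (A : List (List Int)) (c : Int) (m : Nat) {n k : Nat}
    (hc : -1 ≤ c) (hk : k < n) :
    0 ≤ (pvStC A c m n).1.getD k 0 ∧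
    ((pvStC A c m n).2.getD k none = none ↔ (pvStC A c m n).1.getD k 0 = 0) := by
  have h := pv_fdp_getD A c m hc hk
  rw [h.1, h.2]
  exact pv_cell_inv A c m (pvStC A c m n).1 k

-- every entry of the final dp (in or out of range) is nonnegative
theorem pv_fdp_nonneg (A : List (List Int)) (c : Int) (m n : Nat) (hc : -1 ≤ c) :
    ∀ k, 0 ≤ (pvStC A c m n).1.getD k 0 := by
  intro k
  by_cases hk : k < n
  · exact (pv_fdp_props A c m hc hk).1
  · rw [List.getD_eq_default _ _ (by rw [(pvStC_len A c m n).1]; omega)]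

-- ===== PORT B correctness: values and argmaxes =====

-- flattening the nested cell fold over the pair list
theorem pv_cell_pairs (A : List (List Int)) (c : Int) (m : Nat) (dp : List Int) (j2 : Nat) :
    pvCellC A c m dp j2 =
      (pvPairs j2 m).foldl
        (fun ba p => pvStepC A c (pvBaseB c dp p.1) p.1 j2 ba p.2) (0, none) := by
  suffices h : ∀ (outer : List Nat) (st : Int × Option (Int × Int × Int × Int)),
      outer.foldl (fun ba j1 =>
          (List.range m).foldl (pvStepC A c (pvBaseB c dp j1) j1 j2) ba) st =
        (outer.flatMap (fun j1 => (List.range m).map (fun i => (j1, i)))).foldl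
          (fun ba p => pvStepC A c (pvBaseB c dp p.1) p.1 j2 ba p.2) st by
    exact h (List.range j2) (0, none)
  intro outer
  induction outer with
  | nil => intro st; rfl
  | cons j1 rest ih =>
    intro st
    simp only [List.foldl_cons, List.flatMap_cons, List.foldl_append, List.foldl_map]
    exact ih _

-- the candidate comprehension, over an arbitrary pair list
def pvCandsP (A : List (List Int)) (c : Int) (dp : List Int) (j2 : Nat)
    (l : List (Nat × Nat)) : List Int :=
  l.filterMap (fun p =>
    if 0 ≤ pvGet2 A p.2 j2 - pvGet2 A p.2 p.1 then
      some (pvGet2 A p.2 j2 - pvGet2 A p.2 p.1 + pvBaseB c dp p.1)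
    else none)

theorem pv_cands_pairs (A : List (List Int)) (c : Int) (m : Nat) (dp : List Int) (j2 : Nat) :
    pvCands A c m dp j2 = pvCandsP A c dp j2 (pvPairs j2 m) := by
  unfold pvCands pvCandsP pvPairs
  induction (List.range j2) with
  | nil => rfl
  | cons j1 rest ih =>
    simp only [List.flatMap_cons, List.filterMap_append, List.filterMap_map]
    rw [ih]
    rfl

-- fst of the pair fold is the running max of the candidate values
theorem pv_fold_fst (A : List (List Int)) (c : Int) (dp : List Int) (j2 : Nat)
    (l : List (Nat × Nat)) :
    ∀ st : Int × Option (Int × Int × Int × Int),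
      (l.foldl (fun ba p => pvStepC A c (pvBaseB c dp p.1) p.1 j2 ba p.2) st).1 =
        (pvCandsP A c dp j2 l).foldl max st.1 := by
  induction l with
  | nil => intro st; rfl
  | cons p rest ih =>
    intro st
    rw [List.foldl_cons, ih]
    unfold pvCandsP pvStepC
    simp only [List.filterMap_cons]
    by_cases hg : 0 ≤ pvGet2 A p.2 j2 - pvGet2 A p.2 p.1
    · rw [if_pos hg]
      by_cases hl : st.1 < pvGet2 A p.2 j2 - pvGet2 A p.2 p.1 + pvBaseB c dp p.1
      · rw [if_pos ⟨hg, hl⟩, List.foldl_cons]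
        have : max st.1 (pvGet2 A p.2 j2 - pvGet2 A p.2 p.1 + pvBaseB c dp p.1) =
            pvGet2 A p.2 j2 - pvGet2 A p.2 p.1 + pvBaseB c dp p.1 := by omega
        rw [this]
      · rw [if_neg (fun hh => hl hh.2), List.foldl_cons]
        have : max st.1 (pvGet2 A p.2 j2 - pvGet2 A p.2 p.1 + pvBaseB c dp p.1) = st.1 := by omega
        rw [this]
    · rw [if_neg hg, if_neg (fun hh => hg hh.1)]

theorem pv_init_le_foldl_max (l : List Int) : ∀ a : Int, a ≤ l.foldl max a := by
  induction l with
  | nil => intro a; exact le_rfl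
  | cons y l ih =>
    intro a
    rw [List.foldl_cons]
    exact le_trans (le_max_left a y) (ih (max a y))

theorem pv_mem_le_foldl_max (l : List Int) : ∀ (a : Int) (x : Int), x ∈ l → x ≤ l.foldl max a := by
  induction l with
  | nil => intro a x hx; simp at hx
  | cons y l ih =>
    intro a x hx
    rcases List.mem_cons.mp hx with h | h
    · subst h
      rw [List.foldl_cons]
      exact le_trans (le_max_right a x) (pv_init_le_foldl_max l (max a x))
    · rw [List.foldl_cons]
      exact ih _ x h

-- foldl max 0 over a nonnegative list is Python's max(…, default=0)
theorem pv_foldl_max_eq_max? (l : List Int) (h : ∀ v ∈ l, 0 ≤ v) :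
    l.foldl max 0 =
      (match PySem.List.max? l (fun v => v) with | none => 0 | some v => v) := by
  cases l with
  | nil => rfl
  | cons x t =>
    rw [PySem.List.max?_id_cons, List.foldl_cons]
    have : max 0 x = x := max_eq_right (h x List.mem_cons_self)
    rw [this]

theorem pv_candsP_nonneg (A : List (List Int)) (c : Int) (dp : List Int) (j2 : Nat)
    (l : List (Nat × Nat)) (hdp : ∀ k, 0 ≤ dp.getD k 0) :
    ∀ v ∈ pvCandsP A c dp j2 l, 0 ≤ v := by
  intro v hv
  unfold pvCandsP at hv
  rcases List.mem_filterMap.mp hv with ⟨p, hp, hfp⟩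
  by_cases hg : 0 ≤ pvGet2 A p.2 j2 - pvGet2 A p.2 p.1
  · rw [if_pos hg] at hfp
    cases hfp
    have hb : 0 ≤ pvBaseB c dp p.1 := by
      unfold pvBaseB
      split_ifs with hge
      · exact hdp _
      · exact le_rfl
    omega
  · rw [if_neg hg] at hfp
    cases hfp

-- B's dp list equals the value component of the intermediate DP
theorem pv_dpB_eq (A : List (List Int)) (c : Int) (m : Nat) (hc : -1 ≤ c) :
    ∀ n, pvDpB A c m n = (pvStC A c m n).1 := by
  intro n
  induction n with
  | zero => rfl
  | succ n ih =>
    unfold pvDpB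
    rw [List.range_succ, List.foldl_append, List.foldl_cons, List.foldl_nil]
    have hdpn : (List.range n).foldl (fun dp j2 =>
        dp ++ [match PySem.List.max? (pvCands A c m dp j2) (fun v => v) with
               | none => 0
               | some v => v]) [] = (pvStC A c m n).1 := by
      unfold pvDpB at ih; exact ih
    rw [hdpn, pvStC_succ]
    congr 1
    have hnn := pv_fdp_nonneg A c m n hc
    have h1 : (pvCellC A c m (pvStC A c m n).1 n).1 =
        (pvCandsP A c (pvStC A c m n).1 n (pvPairs n m)).foldl max 0 := by
      rw [pv_cell_pairs, pv_fold_fst]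
    rw [h1, ← pv_cands_pairs,
      pv_foldl_max_eq_max? _ (by
        rw [pv_cands_pairs]
        exact pv_candsP_nonneg A c _ n _ hnn)]

-- the find?-style candidate selector mirrored by pick
def pvF4 (A : List (List Int)) (c : Int) (dp : List Int) (j2 : Nat) (b : Int)
    (p : Nat × Nat) : Option (Int × Int × Int × Int) :=
  if 0 ≤ pvGet2 A p.2 j2 - pvGet2 A p.2 p.1 ∧
     pvGet2 A p.2 j2 - pvGet2 A p.2 p.1 + pvBaseB c dp p.1 = b then
    some ((p.2 : Int), (p.1 : Int), (j2 : Int), (p.1 : Int) - c - 1)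
  else none

theorem pv_findSome?_map {α β γ : Type} (l : List α) (f : α → Option β) (g : β → γ) :
    l.findSome? (fun x => (f x).map g) = (l.findSome? f).map g := by
  induction l with
  | nil => rfl
  | cons x l ih =>
    rw [List.findSome?_cons]
    cases hx : f x with
    | none =>
      rw [List.findSome?_cons, hx]
      exact ih
    | some b =>
      rw [List.findSome?_cons, hx]
      rfl

-- the recorded argmax is the first candidate attaining the final max
theorem pv_arg_char (A : List (List Int)) (c : Int) (dp : List Int) (j2 : Nat)
    (l : List (Nat × Nat)) :
    0 < (l.foldl (fun ba p => pvStepC A c (pvBaseB c dp p.1) p.1 j2 ba p.2) (0, none)).1 →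
      (l.foldl (fun ba p => pvStepC A c (pvBaseB c dp p.1) p.1 j2 ba p.2) (0, none)).2 =
        l.findSome? (pvF4 A c dp j2
          (l.foldl (fun ba p => pvStepC A c (pvBaseB c dp p.1) p.1 j2 ba p.2) (0, none)).1) ∧
      (l.foldl (fun ba p => pvStepC A c (pvBaseB c dp p.1) p.1 j2 ba p.2) (0, none)).2 ≠ none := by
  induction l using List.reverseRecOn with
  | nil => intro h; simp at h
  | append_singleton l p ih =>
    rw [List.foldl_append, List.foldl_cons, List.foldl_nil]
    set F := l.foldl (fun ba p => pvStepC A c (pvBaseB c dp p.1) p.1 j2 ba p.2) (0, none)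
      with hFdef
    have hfst : F.1 = (pvCandsP A c dp j2 l).foldl max 0 := pv_fold_fst A c dp j2 l (0, none)
    have hub : ∀ q ∈ l, 0 ≤ pvGet2 A q.2 j2 - pvGet2 A q.2 q.1 →
        pvGet2 A q.2 j2 - pvGet2 A q.2 q.1 + pvBaseB c dp q.1 ≤ F.1 := by
      intro q hq hgq
      rw [hfst]
      apply pv_mem_le_foldl_max
      unfold pvCandsP
      exact List.mem_filterMap.mpr ⟨q, hq, by rw [if_pos hgq]⟩
    show 0 < (pvStepC A c (pvBaseB c dp p.1) p.1 j2 F p.2).1 → _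
    unfold pvStepC
    dsimp only
    by_cases hcnd : 0 ≤ pvGet2 A p.2 j2 - pvGet2 A p.2 p.1 ∧
        F.1 < pvGet2 A p.2 j2 - pvGet2 A p.2 p.1 + pvBaseB c dp p.1
    · rw [if_pos hcnd]
      intro _
      dsimp only
      constructor
      · rw [List.findSome?_append]
        have hnone : l.findSome? (pvF4 A c dp j2
            (pvGet2 A p.2 j2 - pvGet2 A p.2 p.1 + pvBaseB c dp p.1)) = none := by
          apply List.findSome?_eq_none_iff.mpr
          intro q hq
          unfold pvF4
          split_ifs with hq2
          · exfalso
            have := hub q hq hq2.1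
            omega
          · rfl
        rw [hnone, Option.none_or, List.findSome?_cons]
        unfold pvF4
        rw [if_pos ⟨hcnd.1, rfl⟩]
      · simp
    · rw [if_neg hcnd]
      intro hFpos
      obtain ⟨hchar, hne⟩ := ih hFpos
      rcases Option.ne_none_iff_exists'.mp hne with ⟨t, ht⟩
      constructor
      · rw [List.findSome?_append, ← hchar, ht]
        rfl
      · exact hne

-- pick at a positive dp entry returns the projection of the recorded transaction
theorem pv_pick_eq (A : List (List Int)) (c : Int) (m n : Nat) (hc : -1 ≤ c) {d : Nat}
    (hd : d < n) (hpos : 0 < (pvStC A c m n).1.getD d 0) :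
    ∃ i j1 : Int, ∃ prev : Int,
      (pvStC A c m n).2.getD d none = some (i, j1, (d : Int), prev) ∧
      pvPickB A c m (pvStC A c m n).1 d = some (i, j1, prev) ∧
      prev < (d : Int) := by
  have hM := (pv_fdp_getD A c m hc hd).1
  have htr := (pv_fdp_getD A c m hc hd).2
  have hnn := pv_fdp_nonneg A c m n hc
  have hcell : pvCellC A c m (pvStC A c m n).1 d =
      (pvPairs d m).foldl
        (fun ba p => pvStepC A c (pvBaseB c (pvStC A c m n).1 p.1) p.1 d ba p.2) (0, none) :=
    pv_cell_pairs A c m (pvStC A c m n).1 d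
  have hM1 : (pvStC A c m n).1.getD d 0 =
      ((pvPairs d m).foldl
        (fun ba p => pvStepC A c (pvBaseB c (pvStC A c m n).1 p.1) p.1 d ba p.2) (0, none)).1 := by
    rw [hM, hcell]
  have htr1 : (pvStC A c m n).2.getD d none =
      ((pvPairs d m).foldl
        (fun ba p => pvStepC A c (pvBaseB c (pvStC A c m n).1 p.1) p.1 d ba p.2) (0, none)).2 := by
    rw [htr, hcell]
  have hposC : 0 < ((pvPairs d m).foldl
      (fun ba p => pvStepC A c (pvBaseB c (pvStC A c m n).1 p.1) p.1 d ba p.2) (0, none)).1 := by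
    rw [← hM1]; exact hpos
  obtain ⟨hchar, hne⟩ := pv_arg_char A c (pvStC A c m n).1 d (pvPairs d m) hposC
  rcases Option.ne_none_iff_exists'.mp hne with ⟨t, ht⟩
  have hfind : (pvPairs d m).findSome? (pvF4 A c (pvStC A c m n).1 d
      ((pvStC A c m n).1.getD d 0)) = some t := by
    rw [hM1, ← hchar]
    exact ht
  obtain ⟨q, hq, hfq⟩ := List.exists_of_findSome?_eq_some hfind
  unfold pvF4 at hfq
  split_ifs at hfq with hq2
  · cases hfq
    have hq1d : q.1 < d := by
      rcases List.mem_flatMap.mp hq with ⟨j1, hj1, hqm⟩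
      rcases List.mem_map.mp hqm with ⟨i, hi, hqe⟩
      subst hqe
      exact List.mem_range.mp hj1
    refine ⟨(q.2 : Int), (q.1 : Int), (q.1 : Int) - c - 1, ?_, ?_, by
      have : (q.1 : Int) < (d : Int) := by exact_mod_cast hq1d
      omega⟩
    · rw [htr1, ht]
    · unfold pvPickB
      have hfun : (fun (p : Nat × Nat) =>
          if 0 ≤ pvGet2 A p.2 d - pvGet2 A p.2 p.1 ∧
             pvGet2 A p.2 d - pvGet2 A p.2 p.1 + pvBaseB c (pvStC A c m n).1 p.1 =
               (pvStC A c m n).1.getD d 0 then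
            some ((p.2 : Int), (p.1 : Int), (p.1 : Int) - c - 1)
          else none) =
          (fun p => (pvF4 A c (pvStC A c m n).1 d ((pvStC A c m n).1.getD d 0) p).map
            (fun t => (t.1, t.2.1, t.2.2.2))) := by
        funext p
        unfold pvF4
        split_ifs <;> rfl
      rw [hfun, pv_findSome?_map, hfind]
      rfl

-- ----- the carry pass and A's forward fill of transactions -----

def pvPrefMax (dp : List Int) : Nat → Int
  | 0 => dp.getD 0 0
  | k + 1 => max (pvPrefMax dp k) (dp.getD (k + 1) 0)

def pvFillAt (tr : List (Option (Int × Int × Int × Int))) : Nat → Option (Int × Int × Int × Int)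
  | 0 => tr.getD 0 none
  | k + 1 => if tr.getD (k + 1) none ≠ none then tr.getD (k + 1) none else pvFillAt tr k

theorem pvFillAt_succ_none (tr : List (Option (Int × Int × Int × Int))) (k : Nat)
    (h : tr.getD (k + 1) none = none) : pvFillAt tr (k + 1) = pvFillAt tr k := by
  rw [show pvFillAt tr (k + 1) =
      (if tr.getD (k + 1) none ≠ none then tr.getD (k + 1) none else pvFillAt tr k) from rfl, h]
  simp

theorem pvFillAt_succ_some (tr : List (Option (Int × Int × Int × Int))) (k : Nat)
    (h : tr.getD (k + 1) none ≠ none) : pvFillAt tr (k + 1) = tr.getD (k + 1) none := by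
  rw [show pvFillAt tr (k + 1) =
      (if tr.getD (k + 1) none ≠ none then tr.getD (k + 1) none else pvFillAt tr k) from rfl, if_pos h]

theorem pv_prefmax_zero (A : List (List Int)) (c : Int) (m : Nat) {n : Nat} (hc : -1 ≤ c) :
    ∀ k, k < n → pvPrefMax (pvStC A c m n).1 k ≤ 0 →
      pvFillAt (pvStC A c m n).2 k = none := by
  intro k
  induction k with
  | zero =>
    intro hk hle
    have h := pv_fdp_props A c m hc hk
    unfold pvPrefMax at hle
    unfold pvFillAt
    exact h.2.mpr (by omega)
  | succ k ih =>
    intro hk hle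
    unfold pvPrefMax at hle
    have h1 : pvPrefMax (pvStC A c m n).1 k ≤ 0 := le_trans (le_max_left _ _) hle
    have h2 : (pvStC A c m n).1.getD (k + 1) 0 ≤ 0 := le_trans (le_max_right _ _) hle
    have hnone : (pvStC A c m n).2.getD (k + 1) none = none :=
      (pv_fdp_props A c m hc hk).2.mpr (by have := (pv_fdp_props A c m hc hk).1; omega)
    rw [pvFillAt_succ_none _ _ hnone]
    exact ih (by omega) h1

theorem pv_carry (A : List (List Int)) (c : Int) (m n : Nat) (hc : -1 ≤ c) (hn : 0 < n) :
    ∀ t, t ≤ n - 1 →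
      ((List.range' 1 t).foldl pvCarryA (pvStC A c m n)).1.length = n ∧
      ((List.range' 1 t).foldl pvCarryA (pvStC A c m n)).2.length = n ∧
      ∀ k, k < n →
        ((List.range' 1 t).foldl pvCarryA (pvStC A c m n)).1.getD k 0 =
          (if k ≤ t then pvPrefMax (pvStC A c m n).1 k else (pvStC A c m n).1.getD k 0) ∧
        ((List.range' 1 t).foldl pvCarryA (pvStC A c m n)).2.getD k none =
          (if k ≤ t then pvFillAt (pvStC A c m n).2 k else (pvStC A c m n).2.getD k none) := by
  intro t
  induction t with
  | zero =>
    intro _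
    refine ⟨(pvStC_len A c m n).1, (pvStC_len A c m n).2, fun k hk => ?_⟩
    by_cases hk0 : k = 0
    · subst hk0
      exact ⟨by rw [if_pos le_rfl]; rfl, by rw [if_pos le_rfl]; rfl⟩
    · exact ⟨by rw [if_neg (by omega)]; rfl, by rw [if_neg (by omega)]; rfl⟩
  | succ t ih =>
    intro ht
    have hih := ih (by omega)
    rw [List.range'_1_concat, List.foldl_append, List.foldl_cons, List.foldl_nil]
    set stt := (List.range' 1 t).foldl pvCarryA (pvStC A c m n) with hstt
    have hidx : 1 + t - 1 = t := by omega
    have htn : t < n := by omega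
    have ht1n : t + 1 < n := by omega
    have hget1 : stt.1.getD (1 + t - 1) 0 = pvPrefMax (pvStC A c m n).1 t := by
      rw [hidx, (hih.2.2 t htn).1, if_pos le_rfl]
    have hget2 : stt.1.getD (1 + t) 0 = (pvStC A c m n).1.getD (t + 1) 0 := by
      rw [show 1 + t = t + 1 by omega, (hih.2.2 (t + 1) ht1n).1, if_neg (by omega)]
    have hgettr : stt.2.getD (1 + t) none = (pvStC A c m n).2.getD (t + 1) none := by
      rw [show 1 + t = t + 1 by omega, (hih.2.2 (t + 1) ht1n).2, if_neg (by omega)]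
    have hgettr1 : stt.2.getD (1 + t - 1) none = pvFillAt (pvStC A c m n).2 t := by
      rw [hidx, (hih.2.2 t htn).2, if_pos le_rfl]
    have hlen1 : (1 + t) < stt.1.length := by rw [hih.1]; omega
    have hlen2 : (1 + t) < stt.2.length := by rw [hih.2.1]; omega
    have hmax : pvPrefMax (pvStC A c m n).1 (t + 1) =
        max (pvPrefMax (pvStC A c m n).1 t) ((pvStC A c m n).1.getD (t + 1) 0) := rfl
    by_cases hgt : stt.1.getD (1 + t) 0 < stt.1.getD (1 + t - 1) 0
    · have hgt' : (pvStC A c m n).1.getD (t + 1) 0 < pvPrefMax (pvStC A c m n).1 t := by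
        rw [← hget1, ← hget2]; exact hgt
      by_cases hnone : stt.2.getD (1 + t) none = none
      · have hnone' : (pvStC A c m n).2.getD (t + 1) none = none := by rw [← hgettr]; exact hnone
        have hstep : pvCarryA stt (1 + t) =
            (stt.1.set (1 + t) (stt.1.getD (1 + t - 1) 0),
             stt.2.set (1 + t) (stt.2.getD (1 + t - 1) none)) := by
          unfold pvCarryA
          rw [if_pos hgt, if_pos hnone]
        rw [hstep]
        refine ⟨by simpa using hih.1, by simpa using hih.2.1, fun k hk => ⟨?_, ?_⟩⟩
        · by_cases hke : k = 1 + t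
          · subst hke
            rw [pv_getD_set_eq _ _ _ _ hlen1, hget1, if_pos (by omega),
              show 1 + t = t + 1 by omega, hmax, max_eq_left (le_of_lt hgt')]
          · rw [pv_getD_set_ne _ _ _ _ _ hke, (hih.2.2 k hk).1]
            by_cases hkt : k ≤ t
            · rw [if_pos hkt, if_pos (by omega)]
            · rw [if_neg hkt, if_neg (by omega)]
        · by_cases hke : k = 1 + t
          · subst hke
            rw [pv_getD_set_eq' _ _ _ _ hlen2, hgettr1, if_pos (by omega),
              show 1 + t = t + 1 by omega, pvFillAt_succ_none _ _ hnone']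
          · rw [pv_getD_set_ne' _ _ _ _ _ hke, (hih.2.2 k hk).2]
            by_cases hkt : k ≤ t
            · rw [if_pos hkt, if_pos (by omega)]
            · rw [if_neg hkt, if_neg (by omega)]
      · have hnone' : (pvStC A c m n).2.getD (t + 1) none ≠ none := by rw [← hgettr]; exact hnone
        have hstep : pvCarryA stt (1 + t) =
            (stt.1.set (1 + t) (stt.1.getD (1 + t - 1) 0), stt.2) := by
          unfold pvCarryA
          rw [if_pos hgt, if_neg hnone]
        rw [hstep]
        refine ⟨by simpa using hih.1, hih.2.1, fun k hk => ⟨?_, ?_⟩⟩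
        · by_cases hke : k = 1 + t
          · subst hke
            rw [pv_getD_set_eq _ _ _ _ hlen1, hget1, if_pos (by omega),
              show 1 + t = t + 1 by omega, hmax, max_eq_left (le_of_lt hgt')]
          · rw [pv_getD_set_ne _ _ _ _ _ hke, (hih.2.2 k hk).1]
            by_cases hkt : k ≤ t
            · rw [if_pos hkt, if_pos (by omega)]
            · rw [if_neg hkt, if_neg (by omega)]
        · by_cases hke : k = 1 + t
          · subst hke
            rw [hgettr, if_pos (by omega), show 1 + t = t + 1 by omega,
              pvFillAt_succ_some _ _ hnone']
          · rw [(hih.2.2 k hk).2]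
            by_cases hkt : k ≤ t
            · rw [if_pos hkt, if_pos (by omega)]
            · rw [if_neg hkt, if_neg (by omega)]
    · have hstep : pvCarryA stt (1 + t) = stt := by
        unfold pvCarryA
        rw [if_neg hgt]
      have hge' : pvPrefMax (pvStC A c m n).1 t ≤ (pvStC A c m n).1.getD (t + 1) 0 := by
        rw [← hget1, ← hget2]; omega
      rw [hstep]
      refine ⟨hih.1, hih.2.1, fun k hk => ⟨?_, ?_⟩⟩
      · rw [(hih.2.2 k hk).1]
        by_cases hke : k = t + 1
        · subst hke
          rw [if_neg (by omega), if_pos le_rfl, hmax, max_eq_right hge']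
        · by_cases hkt : k ≤ t
          · rw [if_pos hkt, if_pos (by omega)]
          · rw [if_neg hkt, if_neg (by omega)]
      · rw [(hih.2.2 k hk).2]
        by_cases hke : k = t + 1
        · subst hke
          rw [if_neg (by omega), if_pos le_rfl]
          by_cases hnone : (pvStC A c m n).2.getD (t + 1) none = none
          · rw [hnone, pvFillAt_succ_none _ _ hnone]
            have hz : (pvStC A c m n).1.getD (t + 1) 0 = 0 :=
              (pv_fdp_props A c m hc ht1n).2.mp hnone
            exact (pv_prefmax_zero A c m hc t htn (by omega)).symm
          · exact (pvFillAt_succ_some _ _ hnone).symm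
        · by_cases hkt : k ≤ t
          · rw [if_pos hkt, if_pos (by omega)]
          · rw [if_neg hkt, if_neg (by omega)]

-- ----- the two backtracks -----

theorem pvBackA_acc (tr : List (Option (Int × Int × Int × Int))) :
    ∀ fuel (d : Int) res, pvBackA tr fuel d res = res ++ pvBackA tr fuel d [] := by
  intro fuel
  induction fuel with
  | zero => intro d res; simp [pvBackA]
  | succ fuel ih =>
    intro d res
    unfold pvBackA
    split_ifs with hd
    · simp
    · cases htr : tr.getD d.toNat none with
      | none =>
        dsimp only
        rw [ih (d - 1) res]
      | some tup =>
        obtain ⟨i, j1, j2, prev⟩ := tup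
        dsimp only
        rw [ih prev (res ++ [(i + 1, j1 + 1, j2 + 1)]), ih prev ([] ++ [(i + 1, j1 + 1, j2 + 1)])]
        simp

theorem pvWalkB_acc (A : List (List Int)) (c : Int) (m : Nat) (dp : List Int) :
    ∀ fuel (d : Int) res, pvWalkB A c m dp fuel d res = pvWalkB A c m dp fuel d [] ++ res := by
  intro fuel
  induction fuel with
  | zero => intro d res; simp [pvWalkB]
  | succ fuel ih =>
    intro d res
    unfold pvWalkB
    split_ifs with hd hp
    · simp
    · cases hpk : pvPickB A c m dp d.toNat with
      | none => simp
      | some t =>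
        obtain ⟨i, j1, prev⟩ := t
        dsimp only
        rw [ih prev ((i + 1, j1 + 1, d + 1) :: res), ih prev ((i + 1, j1 + 1, d + 1) :: [])]
        simp
    · exact ih (d - 1) res

-- the central backtrack equivalence, over abstract filled/dp tables
theorem pv_back_walk (A : List (List Int)) (c : Int) (m n : Nat) (dp : List Int)
    (filled : List (Option (Int × Int × Int × Int)))
    (Hpos : ∀ d : Nat, d < n → 0 < dp.getD d 0 →
      ∃ i j1 prev : Int, filled.getD d none = some (i, j1, (d : Int), prev) ∧
        pvPickB A c m dp d = some (i, j1, prev) ∧ prev < (d : Int))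
    (Hzero : ∀ d : Nat, d < n → dp.getD d 0 = 0 →
      (d = 0 → filled.getD d none = none) ∧
      (0 < d → filled.getD d none = filled.getD (d - 1) none))
    (Hnn : ∀ d : Nat, 0 ≤ dp.getD d 0) :
    ∀ (k fuelA fuelB : Nat) (d : Int), d < (k : Int) → k ≤ fuelA → k ≤ fuelB → d < (n : Int) →
      (pvBackA filled fuelA d []).reverse = pvWalkB A c m dp fuelB d [] := by
  have hbneg : ∀ fuel (d : Int), d < 0 → pvBackA filled fuel d [] = [] := by
    intro fuel d hd
    cases fuel with
    | zero => rfl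
    | succ fuel => unfold pvBackA; rw [if_pos hd]
  have hwneg : ∀ fuel (d : Int), d < 0 → pvWalkB A c m dp fuel d [] = [] := by
    intro fuel d hd
    cases fuel with
    | zero => rfl
    | succ fuel => unfold pvWalkB; rw [if_pos hd]
  intro k
  induction k with
  | zero =>
    intro fuelA fuelB d hk _ _ _
    rw [hbneg _ _ (by omega), hwneg _ _ (by omega)]
    rfl
  | succ k ih =>
    intro fuelA fuelB d hk hA hB hdn
    by_cases hd : d < 0
    · rw [hbneg _ _ hd, hwneg _ _ hd]; rfl
    obtain ⟨a, rfl⟩ : ∃ a, fuelA = a + 1 := ⟨fuelA - 1, by omega⟩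
    obtain ⟨b, rfl⟩ : ∃ b, fuelB = b + 1 := ⟨fuelB - 1, by omega⟩
    have hdn' : d.toNat < n := by omega
    have hdint : ((d.toNat : Nat) : Int) = d := Int.toNat_of_nonneg (by omega)
    by_cases hp : 0 < dp.getD d.toNat 0
    · obtain ⟨i, j1, prev, hfd, hpick, hprev⟩ := Hpos d.toNat hdn' hp
      have hprev' : prev < (d : Int) := by rw [← hdint]; exact hprev
      have hstepA : pvBackA filled (a + 1) d [] =
          pvBackA filled a prev ([] ++ [(i + 1, j1 + 1, (d.toNat : Int) + 1)]) := by
        rw [pvBackA, if_neg hd, hfd]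
      have hstepB : pvWalkB A c m dp (b + 1) d [] =
          pvWalkB A c m dp b prev ((i + 1, j1 + 1, d + 1) :: []) := by
        rw [pvWalkB, if_neg hd, if_pos hp, hpick]
      rw [hstepA, pvBackA_acc filled a prev ([] ++ [(i + 1, j1 + 1, (d.toNat : Int) + 1)])]
      rw [hstepB, pvWalkB_acc A c m dp b prev ((i + 1, j1 + 1, d + 1) :: [])]
      rw [List.nil_append, List.reverse_append, List.reverse_singleton, hdint]
      exact congrArg (· ++ [(i + 1, j1 + 1, d + 1)])
        (ih a b prev (by omega) (by omega) (by omega) (by omega))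
    · have hz : dp.getD d.toNat 0 = 0 := le_antisymm (by omega) (Hnn d.toNat)
      obtain ⟨hz0, hzs⟩ := Hzero d.toNat hdn' hz
      have hwstep : pvWalkB A c m dp (b + 1) d [] = pvWalkB A c m dp b (d - 1) [] := by
        rw [pvWalkB, if_neg hd, if_neg hp]
      by_cases hd0 : d.toNat = 0
      · have hdz : d = 0 := by omega
        subst hdz
        rw [hwstep, hwneg _ _ (by omega)]
        have hfn := hz0 hd0
        rw [show pvBackA filled (a + 1) 0 [] = pvBackA filled a (-1) [] by
          rw [pvBackA, if_neg hd]
          simp only [Int.toNat_zero] at hfn ⊢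
          rw [hfn]
          norm_num]
        rw [hbneg _ _ (by omega)]
        rfl
      · have hdpos : 0 < d.toNat := by omega
        have hfz := hzs hdpos
        have hd1nat : (d - 1).toNat = d.toNat - 1 := by omega
        cases hfl : filled.getD d.toNat none with
        | none =>
          rw [show pvBackA filled (a + 1) d [] = pvBackA filled a (d - 1) [] by
            rw [pvBackA, if_neg hd, hfl]]
          rw [hwstep]
          exact ih a b (d - 1) (by omega) (by omega) (by omega) (by omega)
        | some tup =>
          obtain ⟨i, j1, j2, prev⟩ := tup
          have heq : pvBackA filled (a + 1) d [] = pvBackA filled (a + 1) (d - 1) [] := by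
            have h1 : pvBackA filled (a + 1) d [] =
                pvBackA filled a prev ([] ++ [(i + 1, j1 + 1, j2 + 1)]) := by
              rw [pvBackA, if_neg hd, hfl]
            have h2 : pvBackA filled (a + 1) (d - 1) [] =
                pvBackA filled a prev ([] ++ [(i + 1, j1 + 1, j2 + 1)]) := by
              rw [pvBackA, if_neg (by omega : ¬(d - 1 : Int) < 0), hd1nat, ← hfz, hfl]
            rw [h1, ← h2]
          rw [heq, hwstep]
          exact ih (a + 1) b (d - 1) (by omega) (by omega) (by omega) (by omega)

-- ===== VERDICT (by name: the statement is the Claim_ definition above) =====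
theorem algorithm6_spec : Claim_equal_algorithm6 := by
  intro A c hdom hpre
  unfold Spec_algorithm6 algorithm6 algorithm6_alt
  have hcond : (A = [] ∨ A.length = 0 ∨ (A.headD []).length = 0) ↔ (A = [] ∨ A.headD [] = []) := by
    constructor
    · rintro (h | h | h)
      · exact Or.inl h
      · exact Or.inl (List.length_eq_zero_iff.mp h)
      · exact Or.inr (List.length_eq_zero_iff.mp h)
    · rintro (h | h)
      · exact Or.inl h
      · exact Or.inr (Or.inr (by rw [h]; rfl))
  by_cases hA : A = [] ∨ A.headD [] = []
  · rw [if_pos (hcond.mpr hA), if_pos hA]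
  · rw [if_neg (fun h => hA (hcond.mp h)), if_neg hA]
    have hne : A.headD [] ≠ [] := fun h => hA (Or.inr h)
    have hn : 0 < (A.headD []).length := List.length_pos_iff.mpr hne
    rcases hpre with hle | ⟨hc, _⟩
    · -- a single day: both programs return []
      have hn1 : (A.headD []).length = 1 := by omega
      dsimp only
      rw [hn1]
      rfl
    dsimp only
    set n := (A.headD []).length with hndef
    set m := A.length with hmdef
    rw [pv_loopA_eq A c m n hc hn, pv_dpB_eq A c m hc n]
    have hcar := pv_carry A c m n hc hn (n - 1) le_rfl
    set st2 := (List.range' 1 (n - 1)).foldl pvCarryA (pvStC A c m n) with hst2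
    have hfill : ∀ d : Nat, d < n → st2.2.getD d none = pvFillAt (pvStC A c m n).2 d := by
      intro d hd
      rw [(hcar.2.2 d hd).2, if_pos (by omega)]
    have hHpos : ∀ d : Nat, d < n → 0 < (pvStC A c m n).1.getD d 0 →
        ∃ i j1 prev : Int, st2.2.getD d none = some (i, j1, (d : Int), prev) ∧
          pvPickB A c m (pvStC A c m n).1 d = some (i, j1, prev) ∧ prev < (d : Int) := by
      intro d hd hpos
      obtain ⟨i, j1, prev, htr, hpick, hprev⟩ := pv_pick_eq A c m n hc hd hpos
      refine ⟨i, j1, prev, ?_, hpick, hprev⟩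
      rw [hfill d hd]
      have hsome : (pvStC A c m n).2.getD d none ≠ none := by
        intro hnone
        have := (pv_fdp_props A c m hc hd).2.mp hnone
        omega
      cases d with
      | zero => rw [show pvFillAt (pvStC A c m n).2 0 = (pvStC A c m n).2.getD 0 none from rfl, htr]
      | succ k => rw [pvFillAt_succ_some _ _ hsome, htr]
    have hHzero : ∀ d : Nat, d < n → (pvStC A c m n).1.getD d 0 = 0 →
        (d = 0 → st2.2.getD d none = none) ∧
        (0 < d → st2.2.getD d none = st2.2.getD (d - 1) none) := by
      intro d hd hz
      have hnone : (pvStC A c m n).2.getD d none = none :=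
        (pv_fdp_props A c m hc hd).2.mpr hz
      constructor
      · intro hd0
        subst hd0
        rw [hfill 0 hd]
        exact hnone
      · intro hdpos
        rw [hfill d hd, hfill (d - 1) (by omega)]
        cases d with
        | zero => omega
        | succ k =>
          rw [pvFillAt_succ_none _ _ hnone]
          rfl
    exact pv_back_walk A c m n (pvStC A c m n).1 st2.2 hHpos hHzero
      (pv_fdp_nonneg A c m n hc) n (n + 1) (n + 1) ((n : Int) - 1)
      (by omega) (by omega) (by omega) (by omega)
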